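-- pv_equiv track=rewrite | github.com/lg-official/jinmei-dict | scripts/jinmei-dict.py | create_itaiji_name
-- ===== SOURCE A (Python) =====
-- import itertools
--
-- def create_itaiji_name(kaki, itaiji):
--     moji_list = []
--     for k in kaki:
--         l = [k]
--         if k in itaiji:
--             l.extend(itaiji[k])
--         moji_list.append(l)
--     kari_list = list(itertools.product(*moji_list))
--     all_kaki = []
--     for kari in kari_list:
--         all_kaki.append(''.join(kari))
--     return all_kaki
-- ===== SOURCE B (Python) =====
-- def create_itaiji_name(kaki, itaiji):
--     variant_lists = []
--     for k in kaki:
--         variant_lists.append([k] + list(itaiji[k]) if k in itaiji else [k])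
--     total = 1
--     for vs in variant_lists:
--         total *= len(vs)
--     all_kaki = []
--     for i in range(total):
--         rem = i
--         chars = []
--         for vs in reversed(variant_lists):
--             rem, d = divmod(rem, len(vs))
--             chars.append(vs[d])
--         all_kaki.append(''.join(reversed(chars)))
--     return all_kaki
-- ===== Notes on version B (the rewrite author's own statement) =====
-- stated objective: alternative
-- what changed: Replaces itertools.product enumeration with counting: computes the total number of combinations and decodes each index 0..total-1 in mixed radix (last character least significant) to select one variant per position.
import Mathlib
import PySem

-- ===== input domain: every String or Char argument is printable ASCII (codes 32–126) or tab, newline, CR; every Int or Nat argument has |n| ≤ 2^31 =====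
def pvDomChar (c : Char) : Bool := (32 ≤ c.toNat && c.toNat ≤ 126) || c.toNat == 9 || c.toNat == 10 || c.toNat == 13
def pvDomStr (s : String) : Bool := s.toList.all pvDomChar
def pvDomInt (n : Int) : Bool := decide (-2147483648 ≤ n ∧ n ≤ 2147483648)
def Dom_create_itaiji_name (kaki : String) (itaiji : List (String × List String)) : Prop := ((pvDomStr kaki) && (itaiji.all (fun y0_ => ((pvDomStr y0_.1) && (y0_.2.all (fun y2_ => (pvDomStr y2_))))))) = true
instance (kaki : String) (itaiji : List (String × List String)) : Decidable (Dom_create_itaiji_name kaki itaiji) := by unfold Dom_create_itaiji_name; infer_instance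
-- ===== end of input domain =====

-- B replaces itertools.product enumeration by counting: it multiplies the variant-list
-- lengths and decodes each index 0..total-1 in mixed radix (objective: alternative).

-- ===== PORT A =====
-- dict membership/lookup on the association list (first match), shared by both ports
def pvLookup (itaiji : List (String × List String)) (k : String) : Option (List String) :=
  (itaiji.find? (fun p => p.1 == k)).map (·.2)

-- itertools.product over a list of lists (first factor varies slowest)
def pvProduct : List (List String) → List (List String)
  | [] => [[]]
  | l :: ls => l.flatMap (fun x => (pvProduct ls).map (fun t => x :: t))

def create_itaiji_name (kaki : String) (itaiji : List (String × List String)) : List String :=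
  let moji_list : List (List String) := kaki.toList.map (fun k =>
    let ks := String.ofList [k]
    let l := [ks]
    match pvLookup itaiji ks with
    | some vs => l ++ vs
    | none => l)
  let kari_list := pvProduct moji_list
  kari_list.map (fun kari => PySem.Str.join "" kari)

-- ===== PORT B =====
-- one fold step of Source B's inner loop over reversed(variant_lists):
-- rem, d = divmod(rem, len(vs)); chars.append(vs[d])
-- (vs.getD d "" is exact here: d = rem % len vs is always in range since vs is nonempty)
def pvStep (p : Nat × List String) (vs : List String) : Nat × List String :=
  (p.1 / vs.length, p.2 ++ [vs.getD (p.1 % vs.length) ""])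

def create_itaiji_name_alt (kaki : String) (itaiji : List (String × List String)) : List String :=
  let variant_lists : List (List String) := kaki.toList.map (fun k =>
    let ks := String.ofList [k]
    match pvLookup itaiji ks with
    | some vs => [ks] ++ vs
    | none => [ks])
  let total := variant_lists.foldl (fun t vs => t * vs.length) 1
  (List.range total).map (fun i =>
    let chars := (variant_lists.reverse.foldl pvStep (i, [])).2
    PySem.Str.join "" chars.reverse)

-- ===== PRECONDITION & SPEC =====
def Spec_create_itaiji_name (kaki : String) (itaiji : List (String × List String)) (out : List String) : Prop := out = create_itaiji_name_alt kaki itaiji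
instance (kaki : String) (itaiji : List (String × List String)) (out : List String) : Decidable (Spec_create_itaiji_name kaki itaiji out) := by unfold Spec_create_itaiji_name; infer_instance

-- ===== CLAIM (what is proved, stated in full; the proofs are below) =====
def Claim_equal_create_itaiji_name : Prop := ∀ (kaki : String) (itaiji : List (String × List String)), Dom_create_itaiji_name kaki itaiji → Spec_create_itaiji_name kaki itaiji (create_itaiji_name kaki itaiji)

-- ===== LEMMAS AND PROOFS =====

-- product of the lengths of the lists
def pvP (L : List (List String)) : Nat := (L.map List.length).prod

-- front-to-back mixed-radix decode (head is the most significant digit)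
def pvDecode : List (List String) → Nat → List String
  | [], _ => []
  | l :: rest, i => l.getD ((i / pvP rest) % l.length) "" :: pvDecode rest i

theorem pvP_cons (l : List String) (rest : List (List String)) :
    pvP (l :: rest) = l.length * pvP rest := by simp [pvP]

theorem pvP_pos {L : List (List String)} (h : ∀ l ∈ L, l ≠ []) : 0 < pvP L := by
  induction L with
  | nil => simp [pvP]
  | cons l rest ih =>
    rw [pvP_cons]
    exact Nat.mul_pos (List.length_pos_iff.mpr (h l (by simp)))
      (ih (fun x hx => h x (List.mem_cons_of_mem _ hx)))

theorem pv_foldl_mul (L : List (List String)) (a : Nat) :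
    L.foldl (fun t vs => t * vs.length) a = a * pvP L := by
  induction L generalizing a with
  | nil => simp [pvP]
  | cons l rest ih => rw [List.foldl_cons, ih, pvP_cons]; ring

-- the fold over the reversed list computes (i / pvP L) and the reversed decode
theorem pv_fold_decode (L : List (List String)) (i : Nat) :
    L.reverse.foldl pvStep (i, []) = (i / pvP L, (pvDecode L i).reverse) := by
  induction L generalizing i with
  | nil => simp [pvP, pvDecode]
  | cons l rest ih =>
    rw [List.reverse_cons, List.foldl_append, ih]
    simp [pvStep, pvDecode, pvP_cons, Nat.div_div_eq_div_mul, Nat.mul_comm]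

-- adding a multiple of pvP L does not change the decode (all lists nonempty)
theorem pv_decode_shift (L : List (List String)) (h : ∀ l ∈ L, l ≠ []) (k j : Nat) :
    pvDecode L (k * pvP L + j) = pvDecode L j := by
  induction L generalizing k with
  | nil => simp [pvDecode]
  | cons l rest ih =>
    have hrest : ∀ x ∈ rest, x ≠ [] := fun x hx => h x (List.mem_cons_of_mem _ hx)
    have hP : 0 < pvP rest := pvP_pos hrest
    have hdiv : (k * pvP (l :: rest) + j) / pvP rest
        = k * l.length + j / pvP rest := by
      rw [pvP_cons, show k * (l.length * pvP rest) + j = pvP rest * (k * l.length) + j by ring,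
        Nat.mul_add_div hP]
    have hmod : (k * l.length + j / pvP rest) % l.length = (j / pvP rest) % l.length := by
      simp [Nat.mul_comm k l.length]
    have hrec : pvDecode rest (k * pvP (l :: rest) + j) = pvDecode rest j := by
      rw [pvP_cons, show k * (l.length * pvP rest) + j = (k * l.length) * pvP rest + j by ring]
      exact ih hrest (k * l.length)
    simp [pvDecode, hdiv, hmod, hrec]

theorem pv_range_mul (a b : Nat) :
    List.range (a * b) = (List.range a).flatMap (fun d => (List.range b).map (fun j => d * b + j)) := by
  induction a with
  | zero => simp
  | succ a ih =>
    rw [Nat.succ_mul, List.range_add, ih, List.range_succ, List.flatMap_append]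
    simp

theorem pv_getD_range (l : List String) :
    (List.range l.length).map (fun d => l.getD d "") = l := by
  induction l with
  | nil => simp
  | cons x t ih =>
    rw [List.length_cons, List.range_succ_eq_map, List.map_cons, List.map_map]
    simp only [List.getD_cons_zero, Function.comp_def, List.getD_cons_succ]
    rw [ih]

-- decoding all indices 0..pvP L - 1 enumerates pvProduct L in order
theorem pv_decode_product (L : List (List String)) (h : ∀ l ∈ L, l ≠ []) :
    (List.range (pvP L)).map (pvDecode L) = pvProduct L := by
  induction L with
  | nil => simp [pvP, pvDecode, pvProduct]
  | cons l rest ih =>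
    have hrest : ∀ x ∈ rest, x ≠ [] := fun x hx => h x (List.mem_cons_of_mem _ hx)
    have hP : 0 < pvP rest := pvP_pos hrest
    rw [pvP_cons, pv_range_mul, List.map_flatMap]
    have rhs : pvProduct (l :: rest)
        = (List.range l.length).flatMap (fun d => (pvProduct rest).map (fun t => l.getD d "" :: t)) := by
      conv_lhs => rw [show pvProduct (l :: rest) = l.flatMap (fun x => (pvProduct rest).map (fun t => x :: t)) from rfl, ← pv_getD_range l]
      rw [List.flatMap_map]
    rw [rhs]
    apply List.flatMap_congr
    intro d hd
    have hdlt : d < l.length := List.mem_range.mp hd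
    rw [← ih hrest, List.map_map, List.map_map]
    apply List.map_congr_left
    intro j hj
    have hjlt : j < pvP rest := List.mem_range.mp hj
    show pvDecode (l :: rest) (d * pvP rest + j) = l.getD d "" :: pvDecode rest j
    have hdiv : (d * pvP rest + j) / pvP rest = d := by
      rw [Nat.mul_comm, Nat.mul_add_div hP]
      simp [Nat.div_eq_of_lt hjlt]
    have hsh : pvDecode rest (d * pvP rest + j) = pvDecode rest j :=
      pv_decode_shift rest hrest d j
    simp only [pvDecode]
    rw [hdiv, Nat.mod_eq_of_lt hdlt, hsh]

-- the whole equivalence over any list of nonempty variant lists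
theorem pv_main (L : List (List String)) (hne : ∀ l ∈ L, l ≠ []) :
    (pvProduct L).map (fun kari => PySem.Str.join "" kari)
    = (List.range (L.foldl (fun t vs => t * vs.length) 1)).map (fun i =>
        PySem.Str.join "" ((L.reverse.foldl pvStep (i, [])).2.reverse)) := by
  rw [pv_foldl_mul, Nat.one_mul, ← pv_decode_product L hne, List.map_map]
  apply List.map_congr_left
  intro i _
  rw [pv_fold_decode]
  simp

-- ===== VERDICT (by name: the statement is the Claim_ definition above) =====
theorem create_itaiji_name_spec : Claim_equal_create_itaiji_name := by
  intro kaki itaiji _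
  show create_itaiji_name kaki itaiji = create_itaiji_name_alt kaki itaiji
  have hne : ∀ l ∈ (kaki.toList.map (fun k =>
      let ks := String.ofList [k]
      match pvLookup itaiji ks with
      | some vs => [ks] ++ vs
      | none => [ks])), l ≠ [] := by
    intro l hl
    obtain ⟨k, _, rfl⟩ := List.mem_map.mp hl
    cases hc : pvLookup itaiji (String.ofList [k]) <;> simp [hc]
  exact pv_main _ hne
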